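-- pv_equiv track=rewrite | github.com/pypi-data/pypi-mirror-403 | packages/onetick-py/onetick_py-1.183.0-py3-none-any.whl/onetick/py/sources/query.py | _escape_characters_in_query_param
-- ===== SOURCE A (Python) =====
-- _QUERY_PARAM_SPECIAL_CHARACTERS = "=,"
--
-- def _escape_characters_in_query_param(result):
--     # 0 - no need to add backslash, 1 - need to add
--     char_map = [0] * len(result)
--
--     # put 1 between two quotes symbols
--     open_char = None
--     last_inx = 0
--     for inx, c in enumerate(result):
--         if open_char == c:
--             open_char = None
--             continue
--
--         if not open_char and c in ("'", '"'):
--             open_char = c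
--             last_inx = inx + 1
--             continue
--
--         if open_char:
--             char_map[inx] = 1
--
--     # clean open tail if necessary
--     if open_char:
--         char_map[last_inx:] = [0] * (len(result) - last_inx)
--
--     # apply mapping
--     res = []
--     last_esc = False  # do not add esc if the previous one is already esc
--     n_brackets_in_expr_block = 0  # do not escape in expr(...)
--     for inx, c in enumerate(result):
--         if c == "(":
--             if n_brackets_in_expr_block:
--                 n_brackets_in_expr_block += 1
--             elif result[inx - 4:inx] == "expr":
--                 n_brackets_in_expr_block = 1
--         if c == ")" and n_brackets_in_expr_block:
--             n_brackets_in_expr_block -= 1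
--
--         if c in _QUERY_PARAM_SPECIAL_CHARACTERS and char_map[inx] == 0:
--             if not last_esc and not n_brackets_in_expr_block:
--                 c = "\\" + c
--
--         last_esc = c == "\\"
--
--         res.append(c)
--
--     return "".join(res)
-- ===== SOURCE B (Python) =====
-- # One forward pass with a quote buffer: chars outside quotes are emitted
-- # immediately (escaping =/, at expr-depth 0 when not preceded by a backslash);
-- # chars after an open quote are buffered and flushed raw when it closes, or
-- # flushed in escaped form at end-of-string if the quote never closes.
-- _QUERY_PARAM_SPECIAL_CHARACTERS = "=,"
--
--
-- def _escape_characters_in_query_param(result):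
--     out = []        # committed output
--     buf_raw = []    # raw chars since the current open quote
--     buf_esc = []    # the same chars, escaped (used only if the quote never closes)
--     open_char = None
--     depth = 0       # expr(...) bracket depth
--     prev = ""       # previous raw character
--     for inx, c in enumerate(result):
--         if c == "(":
--             if depth:
--                 depth += 1
--             elif result[inx - 4:inx] == "expr":
--                 depth = 1
--         elif c == ")" and depth:
--             depth -= 1
--         e = c
--         if c in _QUERY_PARAM_SPECIAL_CHARACTERS and prev != "\\" and not depth:
--             e = "\\" + c
--         if open_char == c:
--             out.extend(buf_raw)
--             out.append(c)
--             buf_raw = []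
--             buf_esc = []
--             open_char = None
--         elif open_char is None and c in ("'", '"'):
--             out.append(c)
--             open_char = c
--         elif open_char:
--             buf_raw.append(c)
--             buf_esc.append(e)
--         else:
--             out.append(e)
--         prev = c
--     if open_char:
--         out.extend(buf_esc)
--     return "".join(out)
-- ===== Notes on version B (the rewrite author's own statement) =====
-- stated objective: alternative
-- what changed: Replaces A's two-phase scheme (precompute a per-index char_map of in-quote positions, then a second escaping pass consulting it) by a single forward pass that emits characters immediately outside quotes and buffers characters after an open quote, flushing them raw on the matching close or in escaped form at end-of-string if the quote never closes.
import Mathlib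
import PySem

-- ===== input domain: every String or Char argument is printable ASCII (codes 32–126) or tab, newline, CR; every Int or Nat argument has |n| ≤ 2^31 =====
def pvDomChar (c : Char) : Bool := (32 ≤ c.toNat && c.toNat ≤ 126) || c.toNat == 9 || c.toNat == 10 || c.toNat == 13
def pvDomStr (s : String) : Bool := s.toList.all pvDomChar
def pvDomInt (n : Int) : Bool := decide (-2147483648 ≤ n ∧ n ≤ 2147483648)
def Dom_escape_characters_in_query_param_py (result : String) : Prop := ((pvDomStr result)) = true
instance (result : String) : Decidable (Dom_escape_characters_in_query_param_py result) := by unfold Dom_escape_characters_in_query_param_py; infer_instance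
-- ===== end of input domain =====

-- B is a single forward pass with a quote buffer instead of A's char_map precomputation + second pass (alternative decomposition, same cost).

-- ===== PORT A =====
-- pass 1 loop body: mark positions strictly between two quote symbols in char_map
def pvStep1 (st : List Int × Option Char × Int) (p : Int × Char) : List Int × Option Char × Int :=
  match st, p with
  | (cmap, oc, li), (inx, c) =>
    if oc = some c then (cmap, none, li)
    else if oc = none ∧ (c = '\'' ∨ c = '"') then (cmap, some c, inx + 1)
    else if oc ≠ none then (PySem.List.pySetD cmap inx 1, oc, li)
    else (cmap, oc, li)

-- pass 2 loop body: apply the mapping (res holds the appended strings, joined at the end)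
def pvStep2 (cs : List Char) (cmap : List Int) (st : List (List Char) × Bool × Int) (p : Int × Char) : List (List Char) × Bool × Int :=
  match st, p with
  | (res, le, nb), (inx, c) =>
    let nb := if c = '(' then
        (if nb ≠ 0 then nb + 1
         else if PySem.List.slice cs (some (inx - 4)) (some inx) = ['e', 'x', 'p', 'r'] then 1 else nb)
      else nb
    let nb := if c = ')' ∧ nb ≠ 0 then nb - 1 else nb
    let c' := if (c = '=' ∨ c = ',') ∧ PySem.List.pyGetD cmap inx 0 = 0 ∧ ¬ le ∧ nb = 0
      then ['\\', c] else [c]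
    (res ++ [c'], decide (c' = ['\\']), nb)

def escape_characters_in_query_param_py (result : String) : String :=
  let cs := result.toList
  let cmap0 : List Int := List.replicate cs.length 0
  let r1 := (PySem.List.enumerate cs).foldl pvStep1 (cmap0, none, 0)
  -- clean open tail: char_map[last_inx:] = [0] * (len(result) - last_inx); last_inx is always in [0, len]
  let cmap := if r1.2.1 ≠ none
    then r1.1.take r1.2.2.toNat ++ List.replicate (cs.length - r1.2.2.toNat) 0
    else r1.1
  let r2 := (PySem.List.enumerate cs).foldl (pvStep2 cs cmap) ([], false, 0)
  String.ofList r2.1.flatten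

-- ===== PORT B =====
-- single-pass loop body; state = (out, buf_raw, buf_esc, open_char, depth, prev)
def pvStepB (cs : List Char) (st : List Char × List Char × List Char × Option Char × Int × Option Char)
    (p : Int × Char) : List Char × List Char × List Char × Option Char × Int × Option Char :=
  match st, p with
  | (out, braw, besc, oc, depth, prev), (inx, c) =>
    let depth := if c = '(' then
        (if depth ≠ 0 then depth + 1
         else if PySem.List.slice cs (some (inx - 4)) (some inx) = ['e', 'x', 'p', 'r'] then 1 else depth)
      else if c = ')' ∧ depth ≠ 0 then depth - 1 else depth
    let e := if (c = '=' ∨ c = ',') ∧ ¬ prev = some '\\' ∧ depth = 0 then ['\\', c] else [c]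
    if oc = some c then (out ++ braw ++ [c], [], [], none, depth, some c)
    else if oc = none ∧ (c = '\'' ∨ c = '"') then (out ++ [c], braw, besc, some c, depth, some c)
    else if oc ≠ none then (out, braw ++ [c], besc ++ e, oc, depth, some c)
    else (out ++ e, braw, besc, oc, depth, some c)

def escape_characters_in_query_param_py_alt (result : String) : String :=
  let cs := result.toList
  let r := (PySem.List.enumerate cs).foldl (pvStepB cs) ([], [], [], none, 0, none)
  String.ofList (r.1 ++ if r.2.2.2.1 ≠ none then r.2.2.1 else [])

-- ===== PRECONDITION & SPEC =====
def Spec_escape_characters_in_query_param_py (result : String) (out : String) : Prop := out = escape_characters_in_query_param_py_alt result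
instance (result : String) (out : String) : Decidable (Spec_escape_characters_in_query_param_py result out) := by unfold Spec_escape_characters_in_query_param_py; infer_instance

-- ===== CLAIM (what is proved, stated in full; the proofs are below) =====
def Claim_equal_escape_characters_in_query_param_py : Prop := ∀ (result : String), Dom_escape_characters_in_query_param_py result → Spec_escape_characters_in_query_param_py result (escape_characters_in_query_param_py result)

-- ===== LEMMAS AND PROOFS =====

-- reference characterisation of A's final char_map (pass 1 + tail cleanup):
-- a position gets 1 iff it is strictly inside a quote pair that eventually closes
def pvCm : Option Char → List Char → List Int
  | _, [] => []
  | none, c :: rest => 0 :: pvCm (if c = '\'' ∨ c = '"' then some c else none) rest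
  | some q, c :: rest =>
    if c = q then 0 :: pvCm none rest
    else (if q ∈ rest then 1 else 0) :: pvCm (some q) rest

-- the depth update (shared shape of both loop bodies) and the emitted string of one step
def pvD (cs : List Char) (d : Int) (k : Nat) (c : Char) : Int :=
  if c = '(' then
    (if d ≠ 0 then d + 1
     else if PySem.List.slice cs (some ((k : Int) - 4)) (some (k : Int)) = ['e', 'x', 'p', 'r'] then 1 else d)
  else if c = ')' ∧ d ≠ 0 then d - 1 else d

def pvEmit (le : Bool) (c : Char) (m : Int) (d : Int) : List Char :=
  if (c = '=' ∨ c = ',') ∧ m = 0 ∧ le = false ∧ d = 0 then ['\\', c] else [c]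

lemma pvCm_length (oc : Option Char) (cs : List Char) : (pvCm oc cs).length = cs.length := by
  induction cs generalizing oc with
  | nil => cases oc <;> simp [pvCm]
  | cons c rest ih =>
    cases oc with
    | none => simp [pvCm, ih]
    | some q => by_cases h : c = q <;> simp [pvCm, h, ih]

lemma pvCm_of_not_mem (q : Char) (cs : List Char) (h : q ∉ cs) :
    pvCm (some q) cs = List.replicate cs.length 0 := by
  induction cs with
  | nil => simp [pvCm]
  | cons c rest ih =>
    simp only [List.mem_cons, not_or] at h
    have hcq : ¬ c = q := fun hh => h.1 hh.symm
    simp [pvCm, hcq, h.2, ih h.2, List.replicate_succ]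

lemma pvEnum_cons (xs : List Char) (k : Nat) (c : Char) :
    PySem.List.enumerate (c :: xs) (k : Int) = ((k : Int), c) :: PySem.List.enumerate xs ((k + 1 : Nat) : Int) := by
  rw [PySem.List.enumerate_cons]; push_cast; ring_nf

lemma pvStep2_norm (cs : List Char) (cmap : List Int) (res : List (List Char)) (le : Bool)
    (d : Int) (k : Nat) (c : Char) (m : Int) (hm : PySem.List.pyGetD cmap (k : Int) 0 = m) :
    pvStep2 cs cmap (res, le, d) ((k : Int), c) =
      (res ++ [pvEmit le c m (pvD cs d k c)],
       decide (pvEmit le c m (pvD cs d k c) = ['\\']), pvD cs d k c) := by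
  simp only [pvStep2, pvEmit, pvD, hm]
  by_cases h1 : c = '('
  · subst h1
    simp [show ¬(('(' : Char) = ')') from by decide, Bool.not_eq_true]
  · simp [h1, Bool.not_eq_true]

lemma pvStepB_norm (cs : List Char) (out braw besc : List Char) (oc : Option Char) (d : Int)
    (prev : Option Char) (k : Nat) (c : Char) :
    pvStepB cs (out, braw, besc, oc, d, prev) ((k : Int), c) =
      (if oc = some c then (out ++ braw ++ [c], [], [], none, pvD cs d k c, some c)
       else if oc = none ∧ (c = '\'' ∨ c = '"') then (out ++ [c], braw, besc, some c, pvD cs d k c, some c)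
       else if oc ≠ none then
         (out, braw ++ [c], besc ++ pvEmit (decide (prev = some '\\')) c 0 (pvD cs d k c), oc, pvD cs d k c, some c)
       else (out ++ pvEmit (decide (prev = some '\\')) c 0 (pvD cs d k c), braw, besc, oc, pvD cs d k c, some c)) := by
  simp only [pvStepB, pvEmit, pvD]
  simp [decide_eq_false_iff_not]

lemma pvEmit_backslash (le : Bool) (c : Char) (m d : Int) :
    decide (pvEmit le c m d = ['\\']) = decide ((some c : Option Char) = some '\\') := by
  unfold pvEmit
  split_ifs with h
  · rcases h.1 with rfl | rfl <;> decide
  · simp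

lemma pvEmit_one (le : Bool) (c : Char) (d : Int) : pvEmit le c 1 d = [c] := by
  simp [pvEmit]

lemma pvEmit_quote (le : Bool) (c : Char) (m d : Int) (h : c = '\'' ∨ c = '"') :
    pvEmit le c m d = [c] := by
  rcases h with rfl | rfl <;> simp [pvEmit]

-- pass 1, stuck in a quote that never closes
lemma pvL3 (rest : List Char) (k : Nat) (cmap : List Int) (q : Char) (li : Int) (hq : q ∉ rest) :
    ((PySem.List.enumerate rest (k : Int)).foldl pvStep1 (cmap, some q, li)).2 = (some q, li) ∧
    ∀ m ≤ k, ((PySem.List.enumerate rest (k : Int)).foldl pvStep1 (cmap, some q, li)).1.take m = cmap.take m := by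
  induction rest generalizing k cmap with
  | nil => simp [PySem.List.enumerate_nil]
  | cons c rest ih =>
    simp only [List.mem_cons, not_or] at hq
    have hstep : pvStep1 (cmap, some q, li) ((k : Int), c) = (cmap.set k 1, some q, li) := by
      simp [pvStep1, hq.1]
    rw [pvEnum_cons, List.foldl_cons, hstep]
    obtain ⟨ih1, ih2⟩ := ih (k + 1) (cmap.set k 1) hq.2
    exact ⟨ih1, fun m hm => by rw [ih2 m (by omega), List.take_set_of_le (by omega)]⟩

-- pass 1 + tail cleanup computes pvCm
lemma pvL2 (cs : List Char) (k : Nat) (cmap : List Int) (oc : Option Char) (li : Int)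
    (h1 : cmap.length = k + cs.length)
    (h2 : cmap.drop k = List.replicate cs.length 0)
    (h3 : oc = none ∨ ∃ q, oc = some q ∧ q ∈ cs) :
    (if ((PySem.List.enumerate cs (k : Int)).foldl pvStep1 (cmap, oc, li)).2.1 ≠ none
     then ((PySem.List.enumerate cs (k : Int)).foldl pvStep1 (cmap, oc, li)).1.take
            ((PySem.List.enumerate cs (k : Int)).foldl pvStep1 (cmap, oc, li)).2.2.toNat ++
          List.replicate (cmap.length - ((PySem.List.enumerate cs (k : Int)).foldl pvStep1 (cmap, oc, li)).2.2.toNat) 0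
     else ((PySem.List.enumerate cs (k : Int)).foldl pvStep1 (cmap, oc, li)).1)
      = cmap.take k ++ pvCm oc cs := by
  induction cs generalizing k cmap oc li with
  | nil =>
    rcases h3 with rfl | ⟨q, rfl, hq⟩
    · simp only [PySem.List.enumerate_nil, List.foldl_nil]
      have ht : cmap.take k = cmap := List.take_of_length_le (by simp at h1; omega)
      simp [pvCm, ht]
    · simp at hq
  | cons c rest ih =>
    simp only [List.length_cons] at h1
    have hk : k < cmap.length := by omega
    have hck : cmap[k]? = some 0 := by
      have h := congrArg (fun l => l[0]?) h2
      simpa [List.getElem?_drop] using h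
    have htake : cmap.take (k + 1) = cmap.take k ++ [(0 : Int)] := by
      rw [List.take_add_one, hck]; rfl
    have hdrop : cmap.drop (k + 1) = List.replicate rest.length 0 := by
      have h := congrArg List.tail h2
      simpa [List.tail_drop, List.replicate_succ] using h
    have h1' : cmap.length = (k + 1) + rest.length := by omega
    rw [pvEnum_cons, List.foldl_cons]
    rcases h3 with rfl | ⟨q, rfl, hq⟩
    · by_cases hquote : c = '\'' ∨ c = '"'
      · have hstep : pvStep1 (cmap, none, li) ((k : Int), c) = (cmap, some c, (k : Int) + 1) := by
          simp [pvStep1, hquote]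
        rw [hstep]
        by_cases hmem : c ∈ rest
        · rw [ih (k + 1) cmap (some c) ((k : Int) + 1) h1' hdrop (Or.inr ⟨c, rfl, hmem⟩)]
          rw [htake]
          simp [pvCm, hquote]
        · obtain ⟨h31, h32⟩ := pvL3 rest (k + 1) cmap c ((k : Int) + 1) hmem
          have hres := h32 (k + 1) (le_refl _)
          have hlen : cmap.length - (k + 1) = rest.length := by omega
          have htn : ((k : Int) + 1).toNat = k + 1 := by omega
          simp only [h31, htn, hres, ne_eq, reduceCtorEq, not_false_eq_true, if_true, hlen]
          rw [htake]
          simp [pvCm, hquote, pvCm_of_not_mem c rest hmem]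
      · have hstep : pvStep1 (cmap, none, li) ((k : Int), c) = (cmap, none, li) := by
          simp [pvStep1, hquote]
        rw [hstep, ih (k + 1) cmap none li h1' hdrop (Or.inl rfl), htake]
        have : (if c = '\'' ∨ c = '"' then some c else none) = (none : Option Char) := by simp [hquote]
        simp [pvCm, this]
    · by_cases hcq : c = q
      · subst hcq
        have hstep : pvStep1 (cmap, some c, li) ((k : Int), c) = (cmap, none, li) := by
          simp [pvStep1]
        rw [hstep, ih (k + 1) cmap none li h1' hdrop (Or.inl rfl), htake]
        simp [pvCm]
      · have hq' : q ∈ rest := by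
          rcases List.mem_cons.mp hq with h | h
          · exact absurd h.symm hcq
          · exact h
        have hqc2 : ¬ q = c := fun hh => hcq hh.symm
        have hstep : pvStep1 (cmap, some q, li) ((k : Int), c) = (cmap.set k 1, some q, li) := by
          simp [pvStep1, hqc2]
        have h1'' : (cmap.set k 1).length = (k + 1) + rest.length := by simp; omega
        have h2'' : (cmap.set k 1).drop (k + 1) = List.replicate rest.length 0 := by
          rw [List.drop_set_of_lt (by omega)]; exact hdrop
        rw [hstep, (by simp : cmap.length = (cmap.set k 1).length),
          ih (k + 1) (cmap.set k 1) (some q) li h1'' h2'' (Or.inr ⟨q, rfl, hq'⟩)]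
        have hins : (cmap.set k 1).take (k + 1) = cmap.take k ++ [(1 : Int)] := by
          rw [List.take_add_one, List.take_set_of_le (le_refl k)]
          simp [hk]
        simp [hins, pvCm, hcq, hq']

-- main simulation: pass 2 over pvCm ↔ B's single pass
lemma pvMain (suffix : List Char) (k : Nat) (cs : List Char) (cmap : List Int)
    (res : List (List Char)) (le : Bool) (nb : Int)
    (out braw besc : List Char) (oc : Option Char) (depth : Int) (prev : Option Char)
    (h1 : cmap.drop k = pvCm oc suffix)
    (h2 : cmap.length = k + suffix.length)
    (h3 : le = decide (prev = some '\\'))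
    (h4 : nb = depth)
    (h5 : oc = none → res.flatten = out ∧ braw = [] ∧ besc = [])
    (h6 : ∀ q, oc = some q → (q = '\'' ∨ q = '"') ∧
      (q ∈ suffix → res.flatten = out ++ braw) ∧ (q ∉ suffix → res.flatten = out ++ besc)) :
    ((PySem.List.enumerate suffix (k : Int)).foldl (pvStep2 cs cmap) (res, le, nb)).1.flatten =
      ((PySem.List.enumerate suffix (k : Int)).foldl (pvStepB cs) (out, braw, besc, oc, depth, prev)).1 ++
      (if ((PySem.List.enumerate suffix (k : Int)).foldl (pvStepB cs) (out, braw, besc, oc, depth, prev)).2.2.2.1 ≠ none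
       then ((PySem.List.enumerate suffix (k : Int)).foldl (pvStepB cs) (out, braw, besc, oc, depth, prev)).2.2.1
       else []) := by
  induction suffix generalizing k res le nb out braw besc oc depth prev with
  | nil =>
    simp only [PySem.List.enumerate_nil, List.foldl_nil]
    rcases oc with _ | q
    · simp [(h5 rfl).1]
    · obtain ⟨_, _, h62⟩ := h6 q rfl
      simp [h62 (by simp)]
  | cons c rest ih =>
    subst h3 h4
    rw [pvEnum_cons, List.foldl_cons, List.foldl_cons, pvStepB_norm]
    rcases oc with _ | q
    · obtain ⟨hres, hbraw, hbesc⟩ := h5 rfl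
      subst hbraw hbesc
      have hcm : pvCm none (c :: rest) = 0 :: pvCm (if c = '\'' ∨ c = '"' then some c else none) rest := rfl
      have hck : cmap[k]? = some 0 := by
        have h := congrArg (fun l => l[0]?) h1
        simpa [List.getElem?_drop, hcm] using h
      have hget : PySem.List.pyGetD cmap (k : Int) 0 = 0 := by
        simp [List.getD_eq_getElem?_getD, hck]
      have hdrop : cmap.drop (k + 1) = pvCm (if c = '\'' ∨ c = '"' then some c else none) rest := by
        have h := congrArg List.tail h1
        simpa [List.tail_drop, hcm] using h
      rw [pvStep2_norm cs cmap res _ _ k c 0 hget, pvEmit_backslash]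
      by_cases hquote : c = '\'' ∨ c = '"'
      · rw [if_neg (by simp), if_pos ⟨rfl, hquote⟩]
        refine ih (k + 1) _ _ _ _ _ _ _ _ _ ?_ ?_ rfl rfl ?_ ?_
        · rw [hdrop, if_pos hquote]
        · simp only [List.length_cons] at h2; omega
        · intro h; exact absurd h (by simp)
        · intro q hq
          obtain rfl : q = c := by simpa using hq.symm
          refine ⟨hquote, ?_, ?_⟩ <;>
            · intro _
              simp [pvEmit_quote _ _ _ _ hquote, hres]
      · rw [if_neg (by simp), if_neg (by simp [hquote]), if_neg (by simp)]
        refine ih (k + 1) _ _ _ _ _ _ _ _ _ ?_ ?_ rfl rfl ?_ ?_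
        · rw [hdrop, if_neg hquote]
        · simp only [List.length_cons] at h2; omega
        · intro _
          refine ⟨?_, rfl, rfl⟩
          simp [hres]
        · intro q hq; exact absurd hq (by simp)
    · obtain ⟨hquote, h61, h62⟩ := h6 q rfl
      by_cases hcq : c = q
      · subst hcq
        have hcm : pvCm (some c) (c :: rest) = 0 :: pvCm none rest := by simp [pvCm]
        have hck : cmap[k]? = some 0 := by
          have h := congrArg (fun l => l[0]?) h1
          simpa [List.getElem?_drop, hcm] using h
        have hget : PySem.List.pyGetD cmap (k : Int) 0 = 0 := by
          simp [List.getD_eq_getElem?_getD, hck]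
        have hdrop : cmap.drop (k + 1) = pvCm none rest := by
          have h := congrArg List.tail h1
          simpa [List.tail_drop, hcm] using h
        rw [pvStep2_norm cs cmap res _ _ k c 0 hget, pvEmit_backslash,
          pvEmit_quote _ _ _ _ hquote, if_pos rfl]
        refine ih (k + 1) _ _ _ _ _ _ _ _ _ ?_ ?_ rfl rfl ?_ ?_
        · exact hdrop
        · simp only [List.length_cons] at h2; omega
        · intro _
          refine ⟨?_, rfl, rfl⟩
          simp [h61 (List.mem_cons_self)]
        · intro q hq; exact absurd hq (by simp)
      · have hqc : q ≠ c := fun h => hcq h.symm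
        by_cases hmem : q ∈ rest
        · have hcm : pvCm (some q) (c :: rest) = 1 :: pvCm (some q) rest := by
            simp [pvCm, hcq, hmem]
          have hck : cmap[k]? = some 1 := by
            have h := congrArg (fun l => l[0]?) h1
            simpa [List.getElem?_drop, hcm] using h
          have hget : PySem.List.pyGetD cmap (k : Int) 0 = 1 := by
            simp [List.getD_eq_getElem?_getD, hck]
          have hdrop : cmap.drop (k + 1) = pvCm (some q) rest := by
            have h := congrArg List.tail h1
            simpa [List.tail_drop, hcm] using h
          rw [pvStep2_norm cs cmap res _ _ k c 1 hget, pvEmit_backslash, pvEmit_one]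
          rw [if_neg (by simp [hqc]), if_neg (by simp), if_pos (by simp)]
          refine ih (k + 1) _ _ _ _ _ _ _ _ _ ?_ ?_ rfl rfl ?_ ?_
          · exact hdrop
          · simp only [List.length_cons] at h2; omega
          · intro h; exact absurd h (by simp)
          · intro q' hq'
            obtain rfl : q' = q := by simpa using hq'.symm
            refine ⟨hquote, ?_, ?_⟩
            · intro _
              simp [h61 (List.mem_cons_of_mem _ hmem)]
            · intro h; exact absurd hmem h
        · have hcm : pvCm (some q) (c :: rest) = 0 :: pvCm (some q) rest := by
            simp [pvCm, hcq, hmem]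
          have hck : cmap[k]? = some 0 := by
            have h := congrArg (fun l => l[0]?) h1
            simpa [List.getElem?_drop, hcm] using h
          have hget : PySem.List.pyGetD cmap (k : Int) 0 = 0 := by
            simp [List.getD_eq_getElem?_getD, hck]
          have hdrop : cmap.drop (k + 1) = pvCm (some q) rest := by
            have h := congrArg List.tail h1
            simpa [List.tail_drop, hcm] using h
          rw [pvStep2_norm cs cmap res _ _ k c 0 hget, pvEmit_backslash]
          rw [if_neg (by simp [hqc]), if_neg (by simp), if_pos (by simp)]
          refine ih (k + 1) _ _ _ _ _ _ _ _ _ ?_ ?_ rfl rfl ?_ ?_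
          · exact hdrop
          · simp only [List.length_cons] at h2; omega
          · intro h; exact absurd h (by simp)
          · intro q' hq'
            obtain rfl : q' = q := by simpa using hq'.symm
            refine ⟨hquote, ?_, ?_⟩
            · intro h; exact absurd h hmem
            · intro _
              have hnotc := fun h => (List.mem_cons.mp h).elim (fun h1 => hqc h1) hmem
              simp [h62 hnotc]

-- ===== VERDICT (by name: the statement is the Claim_ definition above) =====
theorem escape_characters_in_query_param_py_spec : Claim_equal_escape_characters_in_query_param_py := by
  intro result _
  unfold Spec_escape_characters_in_query_param_py
  unfold escape_characters_in_query_param_py escape_characters_in_query_param_py_alt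
  dsimp only
  have hcm := pvL2 result.toList 0 (List.replicate result.toList.length 0) none 0
    (by simp) (by simp) (Or.inl rfl)
  simp only [Nat.cast_zero, List.take_zero, List.nil_append, List.length_replicate] at hcm
  have hmain := pvMain result.toList 0 result.toList (pvCm none result.toList)
    [] false 0 [] [] [] none 0 none
    (by simp) (by simp [pvCm_length]) (by simp) rfl
    (fun _ => ⟨rfl, rfl, rfl⟩) (fun q hq => absurd hq (by simp))
  simp only [Nat.cast_zero] at hmain
  rw [hcm]
  exact congrArg String.ofList hmain
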